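-- pv_equiv track=rewrite | github.com/mariebiscuit/calibration-rule-learning | src/make_datasets.py | __make_agg_set_queries
-- ===== SOURCE A (Python) =====
-- def __make_agg_set_queries(setnum, current_objs, current_ans):
--     paragraphs = []
--     p = f"""## Group {setnum}\n"""
--     p += "\n".join(current_objs) + "\n\n"
--     p += f"""## Group {setnum} Proportion Answered True\n"""
--     for o, a in zip(current_objs, current_ans):
--         p += f"{o} -> "
--         paragraphs.append(p)
--         p += f"{a}\n"
--     p+= "\n"
--     return paragraphs
-- ===== SOURCE B (Python) =====
-- def __make_agg_set_queries(setnum, current_objs, current_ans):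
--     # Every snapshot is a prefix of the full transcript: build it once, slice at computed cuts.
--     pairs = list(zip(current_objs, current_ans))
--     base = (f"## Group {setnum}\n" + "\n".join(current_objs) + "\n\n"
--             + f"## Group {setnum} Proportion Answered True\n")
--     full = base + "".join(f"{o} -> {a}\n" for o, a in pairs)
--     cuts, pos = [], len(base)
--     for o, a in pairs:
--         pos += len(o) + 4
--         cuts.append(pos)
--         pos += len(a) + 1
--     return [full[:c] for c in cuts]
-- ===== Notes on version B (the rewrite author's own statement) =====
-- stated objective: alternative
-- what changed: Instead of growing a mutable buffer and capturing it mid-loop, B builds the complete final transcript once, computes each snapshot's end offset arithmetically from the string lengths, and returns prefix slices of that one string.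
import Mathlib
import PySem

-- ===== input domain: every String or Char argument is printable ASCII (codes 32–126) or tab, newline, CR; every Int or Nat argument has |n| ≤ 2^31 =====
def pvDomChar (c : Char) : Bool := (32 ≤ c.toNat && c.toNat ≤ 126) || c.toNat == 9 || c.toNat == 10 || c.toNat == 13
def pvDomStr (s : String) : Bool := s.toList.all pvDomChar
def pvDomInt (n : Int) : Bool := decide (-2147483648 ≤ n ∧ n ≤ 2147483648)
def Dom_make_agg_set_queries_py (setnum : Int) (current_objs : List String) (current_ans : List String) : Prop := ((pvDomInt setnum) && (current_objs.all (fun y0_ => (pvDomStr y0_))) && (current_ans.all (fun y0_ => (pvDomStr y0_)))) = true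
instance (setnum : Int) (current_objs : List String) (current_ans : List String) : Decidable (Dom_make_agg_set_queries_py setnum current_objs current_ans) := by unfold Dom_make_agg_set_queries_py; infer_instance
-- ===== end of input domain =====

-- B observes that every returned snapshot is a prefix of the full final transcript: it builds
-- that one string, computes the cut offsets from the component lengths, and returns prefix
-- slices — no running buffer captured mid-loop (objective: alternative decomposition, same cost).

-- ===== PORT A =====
-- strings are carried as List Char (PySem.Chars side); the final 'p += "\n"' of A does not
-- affect the returned list and is therefore dead code in the port.
def make_agg_set_queries_py (setnum : Int) (current_objs : List String) (current_ans : List String) : List String :=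
  let p0 : List Char := "## Group ".toList ++ PySem.Int.toChars setnum ++ ['\n']
  let p1 : List Char := p0 ++ PySem.Chars.join ['\n'] (current_objs.map String.toList) ++ ['\n', '\n']
  let p2 : List Char := p1 ++ "## Group ".toList ++ PySem.Int.toChars setnum ++ " Proportion Answered True\n".toList
  let res := (current_objs.zip current_ans).foldl
    (fun (st : List String × List Char) oa =>
      let p := st.2 ++ oa.1.toList ++ " -> ".toList
      (st.1 ++ [String.ofList p], p ++ oa.2.toList ++ ['\n']))
    ([], p2)
  res.1

-- ===== PORT B =====
def make_agg_set_queries_py_alt (setnum : Int) (current_objs : List String) (current_ans : List String) : List String :=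
  let pairs := current_objs.zip current_ans
  let base : List Char :=
    "## Group ".toList ++ PySem.Int.toChars setnum ++ ['\n']
      ++ PySem.Chars.join ['\n'] (current_objs.map String.toList) ++ ['\n', '\n']
      ++ "## Group ".toList ++ PySem.Int.toChars setnum ++ " Proportion Answered True\n".toList
  let full : List Char :=
    base ++ (pairs.map (fun oa => oa.1.toList ++ " -> ".toList ++ oa.2.toList ++ ['\n'])).flatten
  let cuts : List Nat :=
    (pairs.foldl
      (fun (st : List Nat × Nat) oa =>
        let c := st.2 + oa.1.toList.length + 4
        (st.1 ++ [c], c + oa.2.toList.length + 1))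
      ([], base.length)).1
  cuts.map (fun c => String.ofList (full.take c))

-- ===== PRECONDITION & SPEC =====
def Spec_make_agg_set_queries_py (setnum : Int) (current_objs : List String) (current_ans : List String) (out : List String) : Prop := out = make_agg_set_queries_py_alt setnum current_objs current_ans
instance (setnum : Int) (current_objs : List String) (current_ans : List String) (out : List String) : Decidable (Spec_make_agg_set_queries_py setnum current_objs current_ans out) := by unfold Spec_make_agg_set_queries_py; infer_instance

-- ===== CLAIM (what is proved, stated in full; the proofs are below) =====
def Claim_equal_make_agg_set_queries_py : Prop := ∀ (setnum : Int) (current_objs : List String) (current_ans : List String), Dom_make_agg_set_queries_py setnum current_objs current_ans → Spec_make_agg_set_queries_py setnum current_objs current_ans (make_agg_set_queries_py setnum current_objs current_ans)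

-- ===== LEMMAS AND PROOFS =====

def lineOf (oa : String × String) : List Char :=
  oa.1.toList ++ " -> ".toList ++ oa.2.toList ++ ['\n']

lemma take_prefix {α : Type} (xs ys : List α) (c : Nat) (h : c = xs.length) :
    (xs ++ ys).take c = xs := by
  subst h; simp

-- the cuts fold only appends to its list component: pull the accumulator out front
lemma cuts_shift (l : List (String × String)) (n : Nat) (acc : List Nat) :
    (l.foldl
      (fun (st : List Nat × Nat) oa =>
        let c := st.2 + oa.1.toList.length + 4
        (st.1 ++ [c], c + oa.2.toList.length + 1))
      (acc, n)).1
    = acc ++ (l.foldl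
      (fun (st : List Nat × Nat) oa =>
        let c := st.2 + oa.1.toList.length + 4
        (st.1 ++ [c], c + oa.2.toList.length + 1))
      ([], n)).1 := by
  induction l generalizing n acc with
  | nil => simp
  | cons oa l ih =>
    simp only [List.foldl_cons, List.nil_append]
    rw [ih, ih (n + oa.1.toList.length + 4 + oa.2.toList.length + 1)
          [n + oa.1.toList.length + 4]]
    simp

-- A's captured-buffer loop equals slicing the full transcript at the arithmetic cuts
lemma loop_eq_cuts (l : List (String × String)) (p : List Char) (acc : List String) :
    (l.foldl
      (fun (st : List String × List Char) oa =>
        let q := st.2 ++ oa.1.toList ++ " -> ".toList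
        (st.1 ++ [String.ofList q], q ++ oa.2.toList ++ ['\n']))
      (acc, p)).1
    = acc ++ ((l.foldl
      (fun (st : List Nat × Nat) oa =>
        let c := st.2 + oa.1.toList.length + 4
        (st.1 ++ [c], c + oa.2.toList.length + 1))
      ([], p.length)).1).map
        (fun c => String.ofList ((p ++ (l.map lineOf).flatten).take c)) := by
  induction l generalizing p acc with
  | nil => simp
  | cons oa l ih =>
    simp only [List.foldl_cons, List.map_cons, List.flatten_cons, List.nil_append]
    rw [ih, cuts_shift l (p.length + oa.1.toList.length + 4 + oa.2.toList.length + 1)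
          [p.length + oa.1.toList.length + 4]]
    have hlen : p.length + oa.1.toList.length + 4 + oa.2.toList.length + 1
        = (p ++ oa.1.toList ++ " -> ".toList ++ oa.2.toList ++ ['\n']).length := by
      simp [List.length_append]; omega
    have hfull : p ++ (lineOf oa ++ (l.map lineOf).flatten)
        = p ++ oa.1.toList ++ " -> ".toList ++ oa.2.toList ++ ['\n'] ++ (l.map lineOf).flatten := by
      simp [lineOf, List.append_assoc]
    have hhead : (p ++ oa.1.toList ++ " -> ".toList ++ oa.2.toList ++ ['\n']
          ++ (l.map lineOf).flatten).take (p.length + oa.1.toList.length + 4)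
        = p ++ oa.1.toList ++ " -> ".toList := by
      have hsplit : p ++ oa.1.toList ++ " -> ".toList ++ oa.2.toList ++ ['\n'] ++ (l.map lineOf).flatten
          = (p ++ oa.1.toList ++ " -> ".toList) ++ (oa.2.toList ++ ['\n'] ++ (l.map lineOf).flatten) := by
        simp [List.append_assoc]
      rw [hsplit, take_prefix]
      simp [List.length_append]
      omega
    simp only [List.map_append, List.map_cons, List.map_nil]
    rw [hlen, hfull, hhead]
    simp [List.append_assoc]

-- ===== VERDICT (by name: the statement is the Claim_ definition above) =====
theorem make_agg_set_queries_py_spec : Claim_equal_make_agg_set_queries_py := by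
  intro setnum current_objs current_ans _
  unfold Spec_make_agg_set_queries_py make_agg_set_queries_py make_agg_set_queries_py_alt
  simp only []
  rw [loop_eq_cuts]
  have hl : lineOf = fun oa => oa.1.toList ++ (" -> ".toList ++ (oa.2.toList ++ ['\n'])) := by
    funext oa; simp [lineOf, List.append_assoc]
  rw [hl]
  simp only [List.nil_append, List.append_assoc]
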